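-- pv_equiv track=rewrite | github.com/lingqingdada/asc-dev | tools/build/asc_op_compile_base/asc_op_compiler/get_op_tiling.py | get_master_tiling_key_from_group
-- ===== SOURCE A (Python) =====
-- def get_master_tiling_key_from_group(tiling_key: str, tiling_key_group_map: dict = None):
--     if tiling_key_group_map is None:
--         return "", False
--     if tiling_key in tiling_key_group_map.keys():
--         return tiling_key, True
--     for tiling_key_master, tiling_key_slave_list in tiling_key_group_map.items():
--         for tiling_key_slave in tiling_key_slave_list:
--             if tiling_key_slave == tiling_key:
--                 return tiling_key_master, True
--     return "", False
-- ===== SOURCE B (Python) =====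
-- def get_master_tiling_key_from_group(tiling_key: str, tiling_key_group_map: dict = None):
--     if tiling_key_group_map is None:
--         return "", False
--     # build one index: every key -> its master (masters map to themselves and win;
--     # for slaves, the first owning master in iteration order wins)
--     owner = {master: master for master in tiling_key_group_map}
--     for master, slaves in tiling_key_group_map.items():
--         for slave in slaves:
--             owner.setdefault(slave, master)
--     if tiling_key in owner:
--         return owner[tiling_key], True
--     return "", False
-- ===== Notes on version B (the rewrite author's own statement) =====
-- stated objective: idiomatic
-- what changed: Replaces the master-membership test plus nested slave scan with one owner index (key -> master) built in two passes (masters first, then setdefault for slaves) followed by a single lookup.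
import Mathlib
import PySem

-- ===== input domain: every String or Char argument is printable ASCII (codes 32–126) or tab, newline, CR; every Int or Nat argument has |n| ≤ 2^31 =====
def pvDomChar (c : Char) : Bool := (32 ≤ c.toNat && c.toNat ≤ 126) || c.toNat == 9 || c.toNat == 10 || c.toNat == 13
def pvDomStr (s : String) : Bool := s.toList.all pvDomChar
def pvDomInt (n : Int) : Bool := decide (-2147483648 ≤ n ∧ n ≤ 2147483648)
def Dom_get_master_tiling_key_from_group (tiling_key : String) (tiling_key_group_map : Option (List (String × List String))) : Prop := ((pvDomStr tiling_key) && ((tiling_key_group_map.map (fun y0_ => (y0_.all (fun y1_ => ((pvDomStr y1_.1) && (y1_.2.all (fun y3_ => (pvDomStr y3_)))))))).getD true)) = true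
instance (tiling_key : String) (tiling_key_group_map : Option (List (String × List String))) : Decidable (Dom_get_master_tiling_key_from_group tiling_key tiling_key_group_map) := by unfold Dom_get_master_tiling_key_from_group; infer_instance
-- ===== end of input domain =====

-- B builds one key->master owner index (masters first, then setdefault for slaves) and does a single lookup, instead of A's membership test plus nested slave scan; same cost, more idiomatic.

-- ===== PORT A =====
def pvA_slaveHit (tiling_key : String) : List String → Bool
  | [] => false
  | s :: rest => if s == tiling_key then true else pvA_slaveHit tiling_key rest

def pvA_scan (tiling_key : String) : List (String × List String) → String × Bool
  | [] => ("", false)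
  | (master, slaves) :: rest =>
    if pvA_slaveHit tiling_key slaves then (master, true) else pvA_scan tiling_key rest

def get_master_tiling_key_from_group (tiling_key : String) (tiling_key_group_map : Option (List (String × List String))) : String × Bool :=
  match tiling_key_group_map with
  | none => ("", false)
  | some d =>
    if (d.map Prod.fst).contains tiling_key then (tiling_key, true)
    else pvA_scan tiling_key d

-- ===== PORT B =====
-- owner index: masters map to themselves (first pass), slaves get their first master (setdefault)
def pvB_owner (d : List (String × List String)) : PySem.Dict String String :=
  let base := d.foldl (fun acc p => acc.insert p.1 p.1) PySem.Dict.empty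
  d.foldl (fun acc p => p.2.foldl (fun acc2 s => acc2.setdefault s p.1) acc) base

def get_master_tiling_key_from_group_alt (tiling_key : String) (tiling_key_group_map : Option (List (String × List String))) : String × Bool :=
  match tiling_key_group_map with
  | none => ("", false)
  | some d =>
    match (pvB_owner d).get? tiling_key with
    | some master => (master, true)
    | none => ("", false)

-- ===== PRECONDITION & SPEC =====
def Spec_get_master_tiling_key_from_group (tiling_key : String) (tiling_key_group_map : Option (List (String × List String))) (out : String × Bool) : Prop := out = get_master_tiling_key_from_group_alt tiling_key tiling_key_group_map
instance (tiling_key : String) (tiling_key_group_map : Option (List (String × List String))) (out : String × Bool) : Decidable (Spec_get_master_tiling_key_from_group tiling_key tiling_key_group_map out) := by unfold Spec_get_master_tiling_key_from_group; infer_instance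

-- ===== CLAIM (what is proved, stated in full; the proofs are below) =====
def Claim_equal_get_master_tiling_key_from_group : Prop := ∀ (tiling_key : String) (tiling_key_group_map : Option (List (String × List String))), Dom_get_master_tiling_key_from_group tiling_key tiling_key_group_map → Spec_get_master_tiling_key_from_group tiling_key tiling_key_group_map (get_master_tiling_key_from_group tiling_key tiling_key_group_map)

-- ===== LEMMAS AND PROOFS =====

-- option-valued version of A's scan, used only by the proofs below
def pvScanOpt (tiling_key : String) : List (String × List String) → Option String
  | [] => none
  | (master, slaves) :: rest =>
    if pvA_slaveHit tiling_key slaves then some master else pvScanOpt tiling_key rest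

theorem pvA_scan_eq_opt (tk : String) (d : List (String × List String)) :
    pvA_scan tk d = match pvScanOpt tk d with
      | some m => (m, true)
      | none => ("", false) := by
  induction d with
  | nil => rfl
  | cons p rest ih =>
    obtain ⟨m, slaves⟩ := p
    simp only [pvA_scan, pvScanOpt]
    split_ifs <;> simp [ih]

theorem get?_basefold (tk : String) (d : List (String × List String))
    (acc : PySem.Dict String String) :
    (d.foldl (fun a p => a.insert p.1 p.1) acc).get? tk =
      if (d.map Prod.fst).contains tk then some tk else acc.get? tk := by
  induction d generalizing acc with
  | nil => simp
  | cons p rest ih =>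
    simp only [List.foldl_cons, List.map_cons, List.contains_cons, ih,
      PySem.Dict.get?_insert]
    by_cases h : tk = p.1
    · subst h; simp
    · have hb : (tk == p.1) = false := beq_eq_false_iff_ne.mpr h
      rw [hb, Bool.false_or]; simp [h]

theorem get?_setdefault (acc : PySem.Dict String String) (k v tk : String) :
    (acc.setdefault k v).get? tk =
      (acc.get? tk).or (if k == tk then some v else none) := by
  by_cases hc : acc.contains k
  · simp only [PySem.Dict.setdefault, hc, if_true]
    by_cases hk : k = tk
    · subst hk
      have hs : (acc.get? k).isSome := by
        rw [← PySem.Dict.contains_eq_isSome_get?]; exact hc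
      obtain ⟨w, hw⟩ := Option.isSome_iff_exists.mp hs
      simp [hw]
    · simp [hk]
  · simp only [PySem.Dict.setdefault, hc]
    show Option.map (fun x => x.2)
        (List.find? (fun p => p.1 == tk) (acc.items ++ [(k, v)])) = _
    rw [List.find?_append]
    cases h : List.find? (fun p => p.1 == tk) acc.items with
    | some w => simp [PySem.Dict.get?, h]
    | none =>
      by_cases hk : k = tk
      · subst hk; simp [PySem.Dict.get?, h, List.find?]
      · simp [PySem.Dict.get?, h, List.find?, beq_eq_false_iff_ne.mpr hk]

theorem get?_innerfold (tk m : String) (slaves : List String)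
    (acc : PySem.Dict String String) :
    (slaves.foldl (fun a2 s => a2.setdefault s m) acc).get? tk =
      (acc.get? tk).or (if pvA_slaveHit tk slaves then some m else none) := by
  induction slaves generalizing acc with
  | nil => simp [pvA_slaveHit]
  | cons s rest ih =>
    simp only [List.foldl_cons, ih, get?_setdefault, Option.or_assoc, pvA_slaveHit]
    by_cases h : s = tk
    · subst h; simp
    · have h1 : (s == tk) = false := by simpa using h
      simp [h1]

theorem get?_outerfold (tk : String) (d : List (String × List String))
    (acc : PySem.Dict String String) :
    (d.foldl (fun acc p => p.2.foldl (fun acc2 s => acc2.setdefault s p.1) acc) acc).get? tk =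
      (acc.get? tk).or (pvScanOpt tk d) := by
  induction d generalizing acc with
  | nil => simp [pvScanOpt]
  | cons p rest ih =>
    simp only [List.foldl_cons, ih, get?_innerfold, Option.or_assoc, pvScanOpt]
    split_ifs <;> simp

theorem get?_owner (tk : String) (d : List (String × List String)) :
    (pvB_owner d).get? tk =
      if (d.map Prod.fst).contains tk then some tk else pvScanOpt tk d := by
  simp only [pvB_owner, get?_outerfold, get?_basefold]
  split_ifs <;> simp

-- ===== VERDICT (by name: the statement is the Claim_ definition above) =====
theorem get_master_tiling_key_from_group_spec : Claim_equal_get_master_tiling_key_from_group := by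
  intro tk m _
  unfold Spec_get_master_tiling_key_from_group
  cases m with
  | none => rfl
  | some d =>
    simp only [get_master_tiling_key_from_group, get_master_tiling_key_from_group_alt,
      get?_owner, pvA_scan_eq_opt]
    split_ifs with h
    · rfl
    · cases pvScanOpt tk d <;> rfl
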